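-- pv_equiv track=rewrite | github.com/subrotonpi/clone_evaluation | data/gptcb_cross/gptcb_cross/None/715.py | solution
-- ===== SOURCE A (Python) =====
-- def solution (X, A):
--     s = set()
--     sum1 = 0
--     sum2 = 0
--     for i in range (X + 1):
--         sum1 += i
--     for i in range (len (A)):
--         if A[i] in s:
--             continue
--         s.add (A[i])
--         sum2 += A[i]
--         if sum1 == sum2:
--             return i
--     return -1
-- ===== SOURCE B (Python) =====
-- def solution(X, A):
--     # closed-form triangular target; single pass over enumerate(A)
--     target = X * (X + 1) // 2 if X > 0 else 0
--     seen = set()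
--     total = 0
--     for i, a in enumerate(A):
--         if a not in seen:
--             seen.add(a)
--             total += a
--             if total == target:
--                 return i
--     return -1
-- ===== Notes on version B (the rewrite author's own statement) =====
-- stated objective: alternative
-- what changed: Replaces A's O(X) summation loop by the closed-form triangular number X*(X+1)//2 (0 for non-positive X) and scans A once via enumerate instead of indexing by range(len(A)); same cost in len(A), no loop over X.
import Mathlib
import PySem

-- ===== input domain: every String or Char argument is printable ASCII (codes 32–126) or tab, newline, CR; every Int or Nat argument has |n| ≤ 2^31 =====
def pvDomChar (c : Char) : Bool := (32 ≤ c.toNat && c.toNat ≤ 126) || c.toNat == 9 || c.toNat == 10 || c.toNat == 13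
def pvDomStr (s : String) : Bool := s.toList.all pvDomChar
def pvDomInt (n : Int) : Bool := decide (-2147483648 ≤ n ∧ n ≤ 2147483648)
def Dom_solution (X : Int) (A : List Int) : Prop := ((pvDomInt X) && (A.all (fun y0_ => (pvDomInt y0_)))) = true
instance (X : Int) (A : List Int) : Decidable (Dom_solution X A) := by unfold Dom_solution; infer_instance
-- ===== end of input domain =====

-- B replaces A's O(X) summation loop by the closed-form triangular number; proved equal everywhere.

-- ===== PORT A =====
-- second loop of A: iterate over the index list range(len(A)); A[i] is in range, so pyGetD is exact here
def solutionLoopA (sum1 : Int) (A : List Int) : List Int → PySem.Set Int → Int → Int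
  | [], _, _ => -1
  | i :: rest, s, sum2 =>
    let a := PySem.List.pyGetD A i 0
    if PySem.Set.contains s a then solutionLoopA sum1 A rest s sum2
    else
      let s' := PySem.Set.add s a
      let sum2' := sum2 + a
      if sum1 = sum2' then i else solutionLoopA sum1 A rest s' sum2'

def solution (X : Int) (A : List Int) : Int :=
  let sum1 := (PySem.List.pyRange 0 (X + 1) 1).foldl (fun acc i => acc + i) 0
  solutionLoopA sum1 A (PySem.List.pyRange 0 (A.length : Int) 1) PySem.Set.empty 0

-- ===== PORT B =====
-- B's single pass over enumerate(A): structural recursion on A carrying the index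
def solutionLoopB (target : Int) : List Int → Int → PySem.Set Int → Int → Int
  | [], _, _, _ => -1
  | a :: rest, i, seen, total =>
    if PySem.Set.contains seen a then solutionLoopB target rest (i + 1) seen total
    else
      let seen' := PySem.Set.add seen a
      let total' := total + a
      if total' = target then i else solutionLoopB target rest (i + 1) seen' total'

def solution_alt (X : Int) (A : List Int) : Int :=
  let target := if X > 0 then PySem.Int.floordiv (X * (X + 1)) 2 else 0
  solutionLoopB target A 0 PySem.Set.empty 0

-- ===== PRECONDITION & SPEC =====
def Spec_solution (X : Int) (A : List Int) (out : Int) : Prop := out = solution_alt X A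
instance (X : Int) (A : List Int) (out : Int) : Decidable (Spec_solution X A out) := by unfold Spec_solution; infer_instance

-- ===== CLAIM (what is proved, stated in full; the proofs are below) =====
def Claim_equal_solution : Prop := ∀ (X : Int) (A : List Int), Dom_solution X A → Spec_solution X A (solution X A)

-- ===== LEMMAS AND PROOFS =====

-- the summation value: foldl over range(0, n) from any init
lemma foldl_pyRange_sum (n : Nat) (c : Int) :
    (PySem.List.pyRange 0 (n : Int) 1).foldl (fun acc i => acc + i) c
      = c + (n * (n - 1) : Int) / 2 := by
  induction n generalizing c with
  | zero => simp [PySem.List.pyRange_one_eq_nil]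
  | succ m ih =>
    have h : PySem.List.pyRange 0 ((m : Int) + 1) 1
        = PySem.List.pyRange 0 (m : Int) 1 ++ [(m : Int)] :=
      PySem.List.pyRange_one_succ_right (by exact_mod_cast Nat.zero_le m)
    push_cast
    rw [h, List.foldl_append, ih]
    have h2 : ((m : Int) * ((m : Int) - 1)) / 2 + (m : Int)
        = ((m : Int) + 1) * (((m : Int) + 1) - 1) / 2 := by
      have he : (m : Int) * ((m : Int) - 1) + (m : Int) * 2
          = ((m : Int) + 1) * (((m : Int) + 1) - 1) := by ring
      rw [← Int.add_mul_ediv_right ((m : Int) * ((m : Int) - 1)) (m : Int)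
            (by norm_num : (2 : Int) ≠ 0), he]
    simp only [List.foldl]
    omega

lemma sum1_eq_target (X : Int) :
    (PySem.List.pyRange 0 (X + 1) 1).foldl (fun acc i => acc + i) 0
      = (if X > 0 then PySem.Int.floordiv (X * (X + 1)) 2 else 0) := by
  by_cases hX : 0 ≤ X
  · obtain ⟨n, rfl⟩ := Int.eq_ofNat_of_zero_le hX
    have h1 : ((n : Int) + 1) = ((n + 1 : Nat) : Int) := by push_cast; ring
    rw [h1, foldl_pyRange_sum (n + 1) 0]
    rw [PySem.Int.floordiv_eq_ediv_of_pos (by norm_num)]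
    by_cases hn : (0 : Int) < n
    · simp only [hn, if_pos]
      push_cast
      ring_nf
    · have : (n : Nat) = 0 := by omega
      subst this
      norm_num
  · have hnil : PySem.List.pyRange 0 (X + 1) 1 = [] :=
      PySem.List.pyRange_one_eq_nil (by omega)
    rw [hnil]
    simp [show ¬ X > 0 by omega]

-- the two scanning loops agree: A walks range(i, len A) indexing A, B walks (A.drop i) directly
lemma loop_eq (t : Int) (A : List Int) :
    ∀ (i : Nat) (s : PySem.Set Int) (sum2 : Int),
      solutionLoopA t A (PySem.List.pyRange (i : Int) (A.length : Int) 1) s sum2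
        = solutionLoopB t (A.drop i) (i : Int) s sum2 := by
  intro i
  induction hk : A.length - i generalizing i with
  | zero =>
    intro s sum2
    have hle : A.length ≤ i := by omega
    rw [PySem.List.pyRange_one_eq_nil (by exact_mod_cast hle),
        List.drop_eq_nil_of_le hle]
    rfl
  | succ m ih =>
    intro s sum2
    have hlt : i < A.length := by omega
    rw [PySem.List.pyRange_one_cons (by exact_mod_cast hlt),
        List.drop_eq_getElem_cons hlt]
    have hget : PySem.List.pyGetD A (i : Int) 0 = A[i] := by
      simp [List.getD_eq_getElem?_getD, List.getElem?_eq_getElem hlt]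
    have hcast : ((i : Int) + 1) = ((i + 1 : Nat) : Int) := by push_cast; ring
    simp only [solutionLoopA, solutionLoopB, hget, hcast]
    have hcomm : (t = sum2 + A[i]) = (sum2 + A[i] = t) := propext eq_comm
    simp only [hcomm]
    rw [ih (i + 1) (by omega), ih (i + 1) (by omega)]

-- ===== VERDICT (by name: the statement is the Claim_ definition above) =====
theorem solution_spec : Claim_equal_solution := by
  intro X A _
  unfold Spec_solution solution solution_alt
  simp only [sum1_eq_target X]
  have := loop_eq (if X > 0 then PySem.Int.floordiv (X * (X + 1)) 2 else 0) A 0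
      PySem.Set.empty 0
  simpa using this
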